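-- pv_equiv track=rewrite | github.com/givemeapassword/LEGO-3D-MODEL-CONVERTER | instruction_generation.py | get_layer_steps
-- ===== SOURCE A (Python) =====
-- from typing import List, Tuple
--
-- MAX_BRICKS_PER_STEP = 50
--
-- def get_layer_steps(cubes: list, max_bricks_per_step: int = MAX_BRICKS_PER_STEP) -> List[List[Tuple]]:
--     layers = {}
--     for cube in cubes:
--         z = cube[2]
--         layers.setdefault(z, []).append(cube)
--
--     steps = []
--     for z in sorted(layers.keys()):
--         layer_cubes = layers[z]
--         for i in range(0, len(layer_cubes), max_bricks_per_step):
--             steps.append(layer_cubes[i:i + max_bricks_per_step])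
--     return steps
-- ===== SOURCE B (Python) =====
-- MAX_BRICKS_PER_STEP = 50
--
-- def get_layer_steps(cubes, max_bricks_per_step=MAX_BRICKS_PER_STEP):
--     steps = []
--     for z in sorted({c[2] for c in cubes}):
--         layer = [c for c in cubes if c[2] == z]
--         steps.extend(layer[i:i + max_bricks_per_step]
--                      for i in range(0, len(layer), max_bricks_per_step))
--     return steps
-- ===== Notes on version B (the rewrite author's own statement) =====
-- stated objective: idiomatic
-- what changed: Replaces the dict.setdefault bucketing pass (plus sorted-keys lookup) by iterating the sorted set of z-coordinates and selecting each layer with a filter comprehension, chunking via extend of a generator.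
import Mathlib
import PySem

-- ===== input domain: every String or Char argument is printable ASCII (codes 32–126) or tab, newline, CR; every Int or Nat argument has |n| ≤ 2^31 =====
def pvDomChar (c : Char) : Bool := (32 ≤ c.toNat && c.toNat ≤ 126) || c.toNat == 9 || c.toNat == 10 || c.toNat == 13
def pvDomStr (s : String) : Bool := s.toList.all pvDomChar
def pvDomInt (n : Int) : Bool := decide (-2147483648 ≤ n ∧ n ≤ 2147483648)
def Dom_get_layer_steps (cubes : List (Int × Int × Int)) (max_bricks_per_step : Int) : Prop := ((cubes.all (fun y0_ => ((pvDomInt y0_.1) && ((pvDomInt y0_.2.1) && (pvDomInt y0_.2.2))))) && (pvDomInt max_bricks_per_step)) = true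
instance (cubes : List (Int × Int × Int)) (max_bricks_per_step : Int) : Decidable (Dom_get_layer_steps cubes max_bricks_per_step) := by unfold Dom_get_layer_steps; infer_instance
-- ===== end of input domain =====

-- B replaces A's dict.setdefault bucketing by a sorted set of z-keys with a per-layer filter (idiomatic; same results).


-- ===== PORT A =====
-- layers.setdefault(z, []).append(cube) has exactly the effect layers[z] = layers.get(z, []) + [cube]
-- (key appended at the end if new, value position kept otherwise) = Dict.modify z [] (· ++ [cube]).
-- layers[z] for z drawn from layers' own keys is a present-key lookup = getD z [].
def get_layer_steps (cubes : List (Int × Int × Int)) (max_bricks_per_step : Int) : List (List (Int × Int × Int)) :=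
  let layers : PySem.Dict Int (List (Int × Int × Int)) :=
    cubes.foldl (fun d cube => d.modify cube.2.2 [] (fun v => v ++ [cube])) PySem.Dict.empty
  (PySem.List.sorted layers.keys (fun z => z) false).foldl
    (fun steps z =>
      let layer_cubes := layers.getD z []
      (PySem.List.pyRange 0 (layer_cubes.length : Int) max_bricks_per_step).foldl
        (fun steps i => steps ++ [PySem.List.slice layer_cubes (some i) (some (i + max_bricks_per_step))])
        steps)
    []

-- ===== PORT B =====
def get_layer_steps_alt (cubes : List (Int × Int × Int)) (max_bricks_per_step : Int) : List (List (Int × Int × Int)) :=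
  (PySem.List.sorted (PySem.Set.ofList (cubes.map (fun c => c.2.2))) (fun z => z) false).foldl
    (fun steps z =>
      let layer := cubes.filter (fun c => c.2.2 == z)
      steps ++ (PySem.List.pyRange 0 (layer.length : Int) max_bricks_per_step).map
        (fun i => PySem.List.slice layer (some i) (some (i + max_bricks_per_step))))
    []

-- ===== PRECONDITION & SPEC =====
-- Pre_ excludes only max_bricks_per_step = 0 with nonempty cubes, where Python A (and B) raise ValueError from range(..., 0).
def Pre_get_layer_steps (cubes : List (Int × Int × Int)) (max_bricks_per_step : Int) : Prop :=
  cubes = [] ∨ max_bricks_per_step ≠ 0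
instance (cubes : List (Int × Int × Int)) (max_bricks_per_step : Int) : Decidable (Pre_get_layer_steps cubes max_bricks_per_step) := by unfold Pre_get_layer_steps; infer_instance
def pvWitness_get_layer_steps : (List (Int × Int × Int)) × Int := ([(0, 0, 0), (1, 0, 1), (2, 0, 0)], 2)

def Spec_get_layer_steps (cubes : List (Int × Int × Int)) (max_bricks_per_step : Int) (out : List (List (Int × Int × Int))) : Prop := out = get_layer_steps_alt cubes max_bricks_per_step
instance (cubes : List (Int × Int × Int)) (max_bricks_per_step : Int) (out : List (List (Int × Int × Int))) : Decidable (Spec_get_layer_steps cubes max_bricks_per_step out) := by unfold Spec_get_layer_steps; infer_instance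

-- ===== CLAIM (what is proved, stated in full; the proofs are below) =====
def Claim_equal_get_layer_steps : Prop := ∀ (cubes : List (Int × Int × Int)) (max_bricks_per_step : Int), Dom_get_layer_steps cubes max_bricks_per_step → Pre_get_layer_steps cubes max_bricks_per_step → Spec_get_layer_steps cubes max_bricks_per_step (get_layer_steps cubes max_bricks_per_step)

-- ===== LEMMAS AND PROOFS =====

-- A's bucketing dict: its value at z is exactly the subsequence of cubes with third coordinate z.
lemma build_getD (cubes : List (Int × Int × Int)) (z : Int) :
    ((cubes.foldl (fun d cube => d.modify cube.2.2 [] (fun v => v ++ [cube]))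
        (PySem.Dict.empty : PySem.Dict Int (List (Int × Int × Int)))).getD z [])
      = cubes.filter (fun c => c.2.2 == z) := by
  have h := PySem.Dict.getD_foldl_modify_append
      (l := cubes.map (fun c => (c.2.2, c)))
      (d := (PySem.Dict.empty : PySem.Dict Int (List (Int × Int × Int)))) (c := z)
  rw [List.foldl_map] at h
  simpa [List.filter_map, Function.comp_def] using h

-- A's bucketing dict: its key list is set(z-coordinates) in first-occurrence order.
lemma build_keys (cubes : List (Int × Int × Int)) :
    ((cubes.foldl (fun d cube => d.modify cube.2.2 [] (fun v => v ++ [cube]))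
        (PySem.Dict.empty : PySem.Dict Int (List (Int × Int × Int)))).keys)
      = PySem.Set.ofList (cubes.map (fun c => c.2.2)) := by
  have h := PySem.Dict.keys_foldl_modify_key (l := cubes) (key := fun c : Int × Int × Int => c.2.2)
      (d0 := ([] : List (Int × Int × Int))) (f := fun _ cube => fun v => v ++ [cube])
      (d := (PySem.Dict.empty : PySem.Dict Int (List (Int × Int × Int))))
  simpa [PySem.Dict.keys_empty, PySem.Set.update_nil_left] using h

-- ===== VERDICT (by name: the statement is the Claim_ definition above) =====
theorem get_layer_steps_spec : Claim_equal_get_layer_steps := by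
  intro cubes k _ _
  show get_layer_steps cubes k = get_layer_steps_alt cubes k
  simp only [get_layer_steps, get_layer_steps_alt]
  rw [build_keys]
  congr 1
  funext steps z
  rw [build_getD, PySem.List.foldl_append_singleton_eq_map]
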